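-- pv_equiv track=rewrite | github.com/floraldo/hive | apps/qa-agent/src/qa_agent/persona_builder.py | build_violation_summary
-- ===== SOURCE A (Python) =====
-- from typing import Any
--
-- def build_violation_summary(persona: dict[str, Any]) -> str:
--     """Build violation summary for worker context.
--
--     Args:
--         persona: Worker persona
--
--     Returns:
--         Formatted violation summary
--     """
--     violations = persona.get("violations", [])
--
--     if not violations:
--         return "No violations to fix."
--
--     # Group violations by type
--     by_type: dict[str, list[dict[str, Any]]] = {}
--     for violation in violations:
--         vtype = violation.get("type", "unknown")
--         by_type.setdefault(vtype, []).append(violation)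
--
--     lines = [
--         f"# Violations Summary: {len(violations)} total",
--         "",
--     ]
--
--     for vtype, vlist in sorted(by_type.items()):
--         lines.append(f"## {vtype}: {len(vlist)} violations")
--
--         # Show first 3 examples
--         for v in vlist[:3]:
--             file_path = v.get("file", "unknown")
--             message = v.get("message", "No message")
--             lines.append(f"  - {file_path}: {message}")
--
--         if len(vlist) > 3:
--             lines.append(f"  ... and {len(vlist) - 3} more")
--
--         lines.append("")
--
--     return "\n".join(lines)
-- ===== SOURCE B (Python) =====
-- def build_violation_summary(persona):
--     violations = persona.get("violations", [])
--     if not violations: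
--         return "No violations to fix."
--
--     def vtype_of(v):
--         return v.get("type", "unknown")
--
--     lines = [f"# Violations Summary: {len(violations)} total", ""]
--     for vtype in sorted({vtype_of(v) for v in violations}):
--         vlist = [v for v in violations if vtype_of(v) == vtype]
--         block = [f"## {vtype}: {len(vlist)} violations"]
--         block += [
--             f"  - {v.get('file', 'unknown')}: {v.get('message', 'No message')}"
--             for v in vlist[:3]
--         ]
--         if len(vlist) > 3:
--             block.append(f"  ... and {len(vlist) - 3} more")
--         lines += block + [""]
--     return "\n".join(lines)
-- ===== Notes on version B (the rewrite author's own statement) =====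
-- stated objective: simpler
-- what changed: Replaces the dict-of-lists built with setdefault and the sort over dict items by a sorted set of the distinct types with one filter comprehension per type, building each type's block as a list literal instead of sequential appends.
import Mathlib
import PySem

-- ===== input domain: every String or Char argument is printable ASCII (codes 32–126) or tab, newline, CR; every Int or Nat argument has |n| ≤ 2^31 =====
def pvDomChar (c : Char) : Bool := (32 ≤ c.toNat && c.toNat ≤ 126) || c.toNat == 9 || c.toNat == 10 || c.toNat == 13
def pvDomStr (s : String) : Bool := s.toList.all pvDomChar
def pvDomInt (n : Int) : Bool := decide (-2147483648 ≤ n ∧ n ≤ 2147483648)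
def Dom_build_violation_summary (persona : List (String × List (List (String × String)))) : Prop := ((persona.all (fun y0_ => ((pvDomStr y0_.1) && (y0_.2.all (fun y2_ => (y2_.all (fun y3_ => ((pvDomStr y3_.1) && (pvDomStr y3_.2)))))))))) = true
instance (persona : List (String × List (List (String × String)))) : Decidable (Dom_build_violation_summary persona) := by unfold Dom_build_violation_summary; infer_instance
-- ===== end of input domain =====

-- B replaces A's setdefault-built dict of lists (then sorted over its items) by a sorted set of
-- the distinct types with one filter comprehension per type; same return value, no speed claim.

-- shared lookup helpers: these Python expressions appear verbatim in both Source A and Source B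
-- v.get("type", "unknown")
def pvVType (v : List (String × String)) : String := (PySem.Dict.ofList v).getD "type" "unknown"
-- f"  - {v.get('file', 'unknown')}: {v.get('message', 'No message')}"
def pvExLine (v : List (String × String)) : String :=
  "  - " ++ (PySem.Dict.ofList v).getD "file" "unknown" ++ ": " ++ (PySem.Dict.ofList v).getD "message" "No message"

-- ===== PORT A =====
-- sorted(by_type.items()) compares the (vtype, vlist) tuples; the dict keys are distinct, so
-- Python's tuple order is exactly the order of the first components: key = (·.1) is exact.
def build_violation_summary (persona : List (String × List (List (String × String)))) : String :=
  let violations := (PySem.Dict.ofList persona).getD "violations" []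
  if violations = [] then "No violations to fix."
  else
    let by_type := violations.foldl
      (fun d v => d.modify (pvVType v) [] (fun l => l ++ [v])) PySem.Dict.empty
    let lines : List String :=
      ["# Violations Summary: " ++ PySem.Int.toStr (violations.length : Int) ++ " total", ""]
    let lines := (PySem.List.sorted by_type.items (fun p => p.1) false).foldl
      (fun acc p =>
        let acc := acc ++ ["## " ++ p.1 ++ ": " ++ PySem.Int.toStr (p.2.length : Int) ++ " violations"]
        let acc := (PySem.List.slice p.2 none (some 3)).foldl (fun a v => a ++ [pvExLine v]) acc
        let acc := if 3 < p.2.length then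
            acc ++ ["  ... and " ++ PySem.Int.toStr ((p.2.length : Int) - 3) ++ " more"]
          else acc
        acc ++ [""])
      lines
    PySem.Str.join "\n" lines

-- ===== PORT B =====
-- block = [header] + [example line for v in vlist[:3]] (+ the "... and N more" line)
def pvBlock (vtype : String) (vlist : List (List (String × String))) : List String :=
  ["## " ++ vtype ++ ": " ++ PySem.Int.toStr (vlist.length : Int) ++ " violations"]
  ++ (PySem.List.slice vlist none (some 3)).map pvExLine
  ++ (if 3 < vlist.length then
        ["  ... and " ++ PySem.Int.toStr ((vlist.length : Int) - 3) ++ " more"]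
      else [])

def build_violation_summary_alt (persona : List (String × List (List (String × String)))) : String :=
  let violations := (PySem.Dict.ofList persona).getD "violations" []
  if violations = [] then "No violations to fix."
  else
    let lines : List String :=
      ["# Violations Summary: " ++ PySem.Int.toStr (violations.length : Int) ++ " total", ""]
    let lines := (PySem.List.sorted (PySem.Set.ofList (violations.map pvVType)) (fun t => t) false).foldl
      (fun lines t =>
        let vlist := violations.filter (fun v => pvVType v == t)
        lines ++ (pvBlock t vlist ++ [""]))
      lines
    PySem.Str.join "\n" lines

-- ===== PRECONDITION & SPEC =====
def Spec_build_violation_summary (persona : List (String × List (List (String × String)))) (out : String) : Prop := out = build_violation_summary_alt persona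
instance (persona : List (String × List (List (String × String)))) (out : String) : Decidable (Spec_build_violation_summary persona out) := by unfold Spec_build_violation_summary; infer_instance

-- ===== CLAIM (what is proved, stated in full; the proofs are below) =====
def Claim_equal_build_violation_summary : Prop := ∀ (persona : List (String × List (List (String × String)))), Dom_build_violation_summary persona → Spec_build_violation_summary persona (build_violation_summary persona)

-- ===== LEMMAS AND PROOFS =====

-- the grouping dict A builds, as a function of the violation list
def pvGroup (violations : List (List (String × String))) : PySem.Dict String (List (List (String × String))) :=
  violations.foldl (fun d v => d.modify (pvVType v) [] (fun l => l ++ [v])) PySem.Dict.empty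

theorem pvGroup_keys (violations : List (List (String × String))) :
    (pvGroup violations).keys = PySem.Set.ofList (violations.map pvVType) := by
  unfold pvGroup
  rw [PySem.Dict.keys_foldl_modify_key violations pvVType [] (fun _ v l => l ++ [v]),
    PySem.Dict.keys_empty, PySem.Set.update_nil_left]

theorem pvGroup_keys_nodup (violations : List (List (String × String))) :
    (pvGroup violations).keys.Nodup := by
  unfold pvGroup
  exact PySem.Dict.nodup_keys_foldl_modify_key violations pvVType [] (fun _ v l => l ++ [v])
    PySem.Dict.empty PySem.Dict.nodup_keys_empty

theorem pvGroup_getD (violations : List (List (String × String))) (c : String) :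
    (pvGroup violations).getD c [] = violations.filter (fun v => pvVType v == c) := by
  have h : pvGroup violations
      = (violations.map (fun v => (pvVType v, v))).foldl
          (fun d p => d.modify p.1 [] (fun l => l ++ [p.2])) PySem.Dict.empty := by
    rw [List.foldl_map]; rfl
  rw [h, PySem.Dict.getD_foldl_modify_append]
  simp [List.filter_map, Function.comp_def]

theorem pvGroup_sorted_items (violations : List (List (String × String))) :
    PySem.List.sorted (pvGroup violations).items (fun p => p.1) false
      = (PySem.List.sorted (PySem.Set.ofList (violations.map pvVType)) (fun t => t) false).map
          (fun k => (k, violations.filter (fun v => pvVType v == k))) := by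
  have hperm : (((PySem.List.sorted (PySem.Set.ofList (violations.map pvVType)) (fun t => t) false).map
      (fun k => (k, violations.filter (fun v => pvVType v == k))))).Perm (pvGroup violations).items := by
    have h4 := PySem.Dict.items_eq_map_keys (pvGroup violations) (pvGroup_keys_nodup violations) []
    have h5 : (pvGroup violations).items
        = (PySem.Set.ofList (violations.map pvVType)).map
            (fun k => (k, violations.filter (fun v => pvVType v == k))) := by
      rw [h4, pvGroup_keys]
      exact List.map_congr_left (fun k _ => by rw [pvGroup_getD])
    rw [h5]
    exact ((PySem.List.sorted_perm _ _ _).map _)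
  have hpair : List.Pairwise (fun p q : String × List (List (String × String)) => p.1 < q.1)
      ((PySem.List.sorted (PySem.Set.ofList (violations.map pvVType)) (fun t => t) false).map
        (fun k => (k, violations.filter (fun v => pvVType v == k)))) :=
    List.Pairwise.map _ (fun a b h => h)
      (PySem.List.sorted_ofList_pairwise_lt (violations.map pvVType))
  exact PySem.List.sorted_eq_of_perm_of_pairwise_lt _ _ (fun p => p.1) hperm hpair

-- ===== VERDICT (by name: the statement is the Claim_ definition above) =====
theorem build_violation_summary_spec : Claim_equal_build_violation_summary := by
  intro persona _
  show build_violation_summary persona = build_violation_summary_alt persona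
  unfold build_violation_summary build_violation_summary_alt
  by_cases hv : (PySem.Dict.ofList persona).getD "violations" [] = []
  · rw [if_pos hv, if_pos hv]
  · simp only [if_neg hv]
    set violations := (PySem.Dict.ofList persona).getD "violations" [] with hvs
    rw [show (violations.foldl
        (fun d v => d.modify (pvVType v) [] (fun l => l ++ [v])) PySem.Dict.empty)
      = pvGroup violations from rfl]
    rw [pvGroup_sorted_items, List.foldl_map]
    apply congrArg
    apply PySem.List.foldl_congr_mem
    intro acc k hk
    simp only [pvBlock]
    rw [PySem.List.foldl_append_singleton_eq_map]
    split_ifs <;> simp [List.append_assoc]
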